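-- pv_equiv track=rewrite | github.com/sherrylilmj/text2sql-datagen | encoder-decoder-pretrained/utils.py | gen_ngram
-- ===== SOURCE A (Python) =====
-- def gen_ngram(sent, n=2):
--     words = sent.split()
--     ngrams = []
--     for i, token in enumerate(words):
--         if i<=len(words)-n:
--             ngram = '-'.join(words[i:i+n])
--             ngrams.append(ngram)
--     return ngrams
-- ===== SOURCE B (Python) =====
-- def gen_ngram(sent, n=2):
--     words = sent.split()
--     if n > len(words):
--         return []
--     return ['-'.join(gram) for gram in zip(*(words[i:] for i in range(n)))]
-- ===== Notes on version B (the rewrite author's own statement) =====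
-- stated objective: idiomatic
-- what changed: B builds the n-grams with the zip idiom -- zipping n progressively shifted copies of the word list in lockstep and joining each tuple -- instead of A's index-guarded loop that re-slices the word list at every position.
-- intended difference: For n <= 0 on a sentence containing at least one word, A returns one string per word (empty strings, plus for negative n some accidental prefix joins from negative-slice wraparound), while B returns the empty list, the intended answer since no n-gram of non-positive length exists. — e.g. on gen_ngram("a b", 0): A returns ["", ""], B returns []
import Mathlib
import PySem

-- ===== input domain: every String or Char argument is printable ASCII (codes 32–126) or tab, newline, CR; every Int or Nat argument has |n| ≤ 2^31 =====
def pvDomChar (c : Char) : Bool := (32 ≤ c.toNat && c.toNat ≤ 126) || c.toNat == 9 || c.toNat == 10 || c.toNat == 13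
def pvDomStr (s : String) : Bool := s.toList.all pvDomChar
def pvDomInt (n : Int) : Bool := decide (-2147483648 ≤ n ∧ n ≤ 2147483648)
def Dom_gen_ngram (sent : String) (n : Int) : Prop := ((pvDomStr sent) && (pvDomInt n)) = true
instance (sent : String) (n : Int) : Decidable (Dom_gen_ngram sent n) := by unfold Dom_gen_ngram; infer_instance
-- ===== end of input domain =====

-- B builds n-grams with the zip idiom (lockstep over shifted word lists) instead of A's
-- index-guarded re-slicing loop; for n ≤ 0 on a sentence with words B returns the empty
-- list where A returns accidental degenerate strings (the intended difference D_ below).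

-- ===== PORT A =====
def gen_ngram (sent : String) (n : Int) : List String :=
  let words := PySem.Str.split₀ sent
  (PySem.List.enumerate words 0).foldl
    (fun ngrams p =>
      if p.1 ≤ (words.length : Int) - n then
        ngrams ++ [PySem.Str.join "-" (PySem.List.slice words (some p.1) (some (p.1 + n)))]
      else ngrams) []

-- ===== PORT B =====
-- zip(*cols): advance all columns in lockstep, stop at the shortest
def pvZipCols : List String → List (List String) → List (List String)
  | [], _ => []
  | x :: xs, rest =>
    if rest.any (fun c => c.isEmpty) then []
    else (x :: rest.map (fun c => c.headD "")) :: pvZipCols xs (rest.map List.tail)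

def gen_ngram_alt (sent : String) (n : Int) : List String :=
  let words := PySem.Str.split₀ sent
  if (words.length : Int) < n then []
  else match (PySem.List.pyRange 0 n 1).map (fun i => PySem.List.slice words (some i) none) with
  | [] => []
  | c :: cs => (pvZipCols c cs).map (fun g => PySem.Str.join "-" g)

-- ===== PRECONDITION & SPEC =====
-- For n ≤ 0 on a sentence containing at least one word, A returns one string per word
-- (empty strings, plus for negative n some accidental prefix joins from negative-slice
-- wraparound), while B returns the empty list: no n-gram of non-positive length exists.
def D_gen_ngram (sent : String) (n : Int) : Prop :=
  n ≤ 0 ∧ PySem.Str.split₀ sent ≠ []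
instance (sent : String) (n : Int) : Decidable (D_gen_ngram sent n) := by
  unfold D_gen_ngram; infer_instance

def Spec_gen_ngram (sent : String) (n : Int) (out : List String) : Prop :=
  ¬ D_gen_ngram sent n → out = gen_ngram_alt sent n
instance (sent : String) (n : Int) (out : List String) : Decidable (Spec_gen_ngram sent n out) := by
  unfold Spec_gen_ngram; infer_instance

def pvDiffWitness_gen_ngram : String × Int := ("a b", 0)
def pvDiffWitnessOut_gen_ngram : (List String) × (List String) := (["", ""], [])

-- ===== CLAIM (what is proved, stated in full; the proofs are below) =====
def Claim_unchanged_gen_ngram : Prop := ∀ (sent : String) (n : Int), Dom_gen_ngram sent n → Spec_gen_ngram sent n (gen_ngram sent n)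
def Claim_changed_gen_ngram : Prop := Dom_gen_ngram (pvDiffWitness_gen_ngram.1) (pvDiffWitness_gen_ngram.2) ∧ D_gen_ngram (pvDiffWitness_gen_ngram.1) (pvDiffWitness_gen_ngram.2) ∧ gen_ngram (pvDiffWitness_gen_ngram.1) (pvDiffWitness_gen_ngram.2) = pvDiffWitnessOut_gen_ngram.1 ∧ gen_ngram_alt (pvDiffWitness_gen_ngram.1) (pvDiffWitness_gen_ngram.2) = pvDiffWitnessOut_gen_ngram.2 ∧ pvDiffWitnessOut_gen_ngram.1 ≠ pvDiffWitnessOut_gen_ngram.2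
def Claim_exact_gen_ngram : Prop := ∀ (sent : String) (n : Int), Dom_gen_ngram sent n → D_gen_ngram sent n → gen_ngram sent n ≠ gen_ngram_alt sent n

-- ===== LEMMAS AND PROOFS =====

lemma drop_take_eq_map_heads (ws : List String) :
    ∀ (b a : Nat), a + b ≤ ws.length →
      (ws.drop a).take b = (List.range' a b).map (fun i => (ws.drop i).headD "") := by
  intro b
  induction b with
  | zero => intro a _; simp
  | succ b ih =>
    intro a h
    have ha : a < ws.length := by omega
    rw [List.drop_eq_getElem_cons ha, List.range'_succ, List.take_succ_cons, List.map_cons]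
    congr 1
    · simp [List.head?_drop, List.getElem?_eq_getElem ha]
    · exact ih (a+1) (by omega)

lemma range_filter_le (L : Nat) (c : Int) :
    (List.range L).filter (fun (i : Nat) => decide ((i : Int) ≤ c)) = List.range (min L (c+1).toNat) := by
  induction L with
  | zero => simp
  | succ L ih =>
    rw [List.range_succ, List.filter_append, ih]
    by_cases h : (L : Int) ≤ c
    · have h1 : min L (c+1).toNat = L := by omega
      have h2 : min (L+1) (c+1).toNat = L+1 := by omega
      simp [h, h1, List.range_succ]
    · have h2 : min (L+1) (c+1).toNat = min L (c+1).toNat := by omega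
      simp [h, h2]

lemma pvZipCols_drop (ws : List String) (m : Nat) :
    ∀ (d k : Nat), ws.length ≤ k + d →
      pvZipCols (ws.drop k) ((List.range' (k+1) m).map (fun i => ws.drop i)) =
        (List.range' k (ws.length - (k + m))).map (fun i => (ws.drop i).take (m+1)) := by
  intro d
  induction d with
  | zero =>
    intro k hk
    have h1 : ws.drop k = [] := List.drop_eq_nil_of_le (by omega)
    have h2 : ws.length - (k + m) = 0 := by omega
    rw [h1, h2]; simp [pvZipCols]
  | succ d ih =>
    intro k hk
    by_cases hkL : k < ws.length
    · rw [List.drop_eq_getElem_cons hkL]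
      by_cases hend : ws.length ≤ k + m
      · -- some column is empty (needs m ≥ 1 since k < L)
        have hm : 1 ≤ m := by omega
        have hany : ((List.range' (k+1) m).map (fun i => ws.drop i)).any (fun c => c.isEmpty) = true := by
          rw [List.any_map]
          rw [List.any_eq_true]
          refine ⟨k + m, ?_, ?_⟩
          · rw [List.mem_range']
            exact ⟨m - 1, by omega, by omega⟩
          · simp [List.drop_eq_nil_of_le (by omega : ws.length ≤ k + m)]
        have h2 : ws.length - (k + m) = 0 := by omega
        rw [h2]; simp [pvZipCols, hany]
      · -- all columns non-empty
        have hany : ((List.range' (k+1) m).map (fun i => ws.drop i)).any (fun c => c.isEmpty) = false := by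
          rw [List.any_map]
          rw [List.any_eq_false]
          intro i hi
          rw [List.mem_range'] at hi
          obtain ⟨j, hj, rfl⟩ := hi
          simp [List.isEmpty_iff, List.drop_eq_nil_iff]
          omega
        simp only [pvZipCols, hany, Bool.false_eq_true, if_false]
        have hrow : ws[k] :: ((List.range' (k+1) m).map (fun i => ws.drop i)).map (fun c => c.headD "") 
            = (ws.drop k).take (m+1) := by
          rw [List.map_map]
          rw [drop_take_eq_map_heads ws (m+1) k (by omega), List.range'_succ, List.map_cons]
          congr 1
          simp [List.head?_drop, List.getElem?_eq_getElem hkL]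
        have htails : ((List.range' (k+1) m).map (fun i => ws.drop i)).map List.tail
            = (List.range' (k+1+1) m).map (fun i => ws.drop i) := by
          rw [List.map_map]
          rw [List.range'_eq_map_range, List.range'_eq_map_range (s := k+1+1)]
          rw [List.map_map, List.map_map]
          apply List.map_congr_left
          intro x _
          simp [List.tail_drop]
          congr 1
          omega
        rw [hrow, htails, ih (k+1) (by omega)]
        have hlen : ws.length - (k + m) = (ws.length - (k + 1 + m)) + 1 := by omega
        rw [hlen, List.range'_succ, List.map_cons]
    · have h1 : ws.drop k = [] := List.drop_eq_nil_of_le (by omega)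
      have h2 : ws.length - (k + m) = 0 := by omega
      rw [h1, h2]; simp [pvZipCols]

lemma genB_canon (sent : String) (n : Int) (hn : 1 ≤ n) :
    gen_ngram_alt sent n =
      (List.range ((PySem.Str.split₀ sent).length - (n.toNat - 1))).map
        (fun i => PySem.Str.join "-" (((PySem.Str.split₀ sent).drop i).take n.toNat)) := by
  obtain ⟨m, rfl⟩ : ∃ m : Nat, n = (m:Int) := ⟨n.toNat, by omega⟩
  have hm1 : 1 ≤ m := by exact_mod_cast hn
  simp only [gen_ngram_alt, Int.toNat_natCast]
  by_cases hbig : ((PySem.Str.split₀ sent).length : Int) < (m : Int)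
  · have h0 : (PySem.Str.split₀ sent).length - (m - 1) = 0 := by omega
    rw [if_pos hbig, h0]
    simp
  rw [if_neg hbig]
  rw [PySem.List.pyRange_one]
  simp only [Int.sub_zero, Int.toNat_natCast, zero_add, List.map_map]
  have hc : (List.range m).map ((fun i => PySem.List.slice (PySem.Str.split₀ sent) (some i) none) ∘ fun (k : Nat) => (k:Int))
      = (List.range m).map (fun k => (PySem.Str.split₀ sent).drop k) := by
    apply List.map_congr_left; intro k _
    simp [PySem.List.slice_from_natCast]
  rw [hc]
  rw [List.range_eq_range']
  have hsplit : m = (m - 1) + 1 := by omega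
  rw [hsplit, List.range'_succ, List.map_cons]
  show (pvZipCols _ _).map _ = _
  rw [pvZipCols_drop (PySem.Str.split₀ sent) (m - 1) (PySem.Str.split₀ sent).length 0 (by omega)]
  rw [List.map_map]
  have he : (m - 1) + 1 = m := by omega
  rw [he, ← List.range_eq_range']
  congr 1
  simp

lemma genA_canon (sent : String) (n : Int) (hn : 1 ≤ n) :
    gen_ngram sent n =
      (List.range ((PySem.Str.split₀ sent).length - (n.toNat - 1))).map
        (fun i => PySem.Str.join "-" (((PySem.Str.split₀ sent).drop i).take n.toNat)) := by
  obtain ⟨m, rfl⟩ : ∃ m : Nat, n = (m:Int) := ⟨n.toNat, by omega⟩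
  have hm1 : 1 ≤ m := by exact_mod_cast hn
  simp only [gen_ngram, Int.toNat_natCast]
  rw [PySem.List.foldl_append_ite]
  rw [PySem.List.enumerate_eq_map_pyRange (d := "")]
  rw [List.filter_map, List.map_map]
  rw [PySem.List.pyRange_one]
  simp only [PySem.List.len, Int.sub_zero, Int.toNat_natCast, zero_add, List.nil_append,
    List.filter_map, List.map_map, Function.comp_def]
  rw [range_filter_le]
  have hmin : min (PySem.Str.split₀ sent).length ((((PySem.Str.split₀ sent).length : Int) - (m:Int) + 1).toNat)
      = (PySem.Str.split₀ sent).length - (m - 1) := by omega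
  rw [hmin]
  apply List.map_congr_left
  intro k _
  rw [PySem.List.slice_natCast_add]

-- ===== VERDICT (by name: the statement is the Claim_ definition above) =====
theorem gen_ngram_spec : Claim_unchanged_gen_ngram := by
  intro sent n _ hnd
  by_cases hn : 1 ≤ n
  · rw [genA_canon sent n hn, genB_canon sent n hn]
  · have hn0 : n ≤ 0 := by omega
    unfold D_gen_ngram at hnd
    have hsp : PySem.Str.split₀ sent = [] := by
      by_contra hne
      exact hnd ⟨hn0, hne⟩
    simp [gen_ngram, gen_ngram_alt, hsp, PySem.List.pyRange_one_eq_nil hn0]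

theorem gen_ngram_changed : Claim_changed_gen_ngram := by
  unfold Claim_changed_gen_ngram; decide

theorem gen_ngram_tight : Claim_exact_gen_ngram := by
  intro sent n _ hD
  unfold D_gen_ngram at hD
  obtain ⟨hn0, hne⟩ := hD
  have hB : gen_ngram_alt sent n = [] := by
    have hg : ¬ (((PySem.Str.split₀ sent).length : Int) < n) := by
      have : 1 ≤ (PySem.Str.split₀ sent).length := List.length_pos_iff.mpr hne
      omega
    simp [gen_ngram_alt, hg, PySem.List.pyRange_one_eq_nil hn0]
  rw [hB]
  simp only [gen_ngram]
  rw [PySem.List.foldl_append_ite, List.nil_append]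
  rw [List.filter_eq_self.mpr ?hall]
  case hall =>
    intro p hp
    rw [PySem.List.mem_enumerate_iff] at hp
    obtain ⟨k, hk, rfl⟩ := hp
    simp only [decide_eq_true_eq]
    omega
  intro hcon
  have hlen := congrArg List.length hcon
  simp [PySem.List.length_enumerate] at hlen
  exact hne hlen
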